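-- pv_equiv track=rewrite | github.com/Angeschossen/Blackmagic-Smart-Videohub-Scheduler-Executor | main.py | getCorrespondingLines
-- ===== SOURCE A (Python) =====
-- def getCorrespondingLines(lines, look):
--     found = False
--
--     index = -1
--     for i in range(len(lines)):
--         if lines[i] == look:
--             index = i
--             break
--
--     if index == -1:
--         raise SyntaxError("Entry not found in videohub response: " + look)
--
--     n = []
--     for i in range(index + 1, len(lines)):
--         line = lines[i]
--         if line == "":
--             break; # end
--
--         n.append(line)
--
--     return n
-- ===== SOURCE B (Python) =====
-- def getCorrespondingLines(lines, look):
--     try: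
--         rest = lines[lines.index(look) + 1:]
--     except ValueError:
--         raise SyntaxError("Entry not found in videohub response: " + look)
--     if "" in rest:
--         return rest[:rest.index("")]
--     return rest
-- ===== Notes on version B (the rewrite author's own statement) =====
-- stated objective: idiomatic
-- what changed: A's two hand-written index loops (locate the marker, then collect until blank) are replaced by list built-ins: slice the tail after lines.index(look) and cut it at rest.index('') when a blank is present.
import Mathlib
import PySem

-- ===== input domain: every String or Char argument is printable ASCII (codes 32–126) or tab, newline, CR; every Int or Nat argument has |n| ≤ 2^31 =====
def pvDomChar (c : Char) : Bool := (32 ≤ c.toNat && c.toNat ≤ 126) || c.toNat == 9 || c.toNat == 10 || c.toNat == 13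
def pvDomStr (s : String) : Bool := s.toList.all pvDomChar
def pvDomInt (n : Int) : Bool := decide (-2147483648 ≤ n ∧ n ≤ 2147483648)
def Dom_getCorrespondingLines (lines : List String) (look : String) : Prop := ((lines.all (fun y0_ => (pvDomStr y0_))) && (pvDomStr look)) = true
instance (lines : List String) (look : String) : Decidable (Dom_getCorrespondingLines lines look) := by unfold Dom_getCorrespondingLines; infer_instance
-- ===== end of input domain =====

-- B replaces A's two hand-written index loops by list built-ins (index, slicing); equal wherever
-- A returns (Pre_: `look` occurs in `lines`; elsewhere both Pythons raise the same SyntaxError).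

-- ===== PORT A =====
-- first loop of A: for i in range(len(lines)): if lines[i] == look: index = i; break  (else index = -1)
def aFind (lines : List String) (look : String) (i : Nat) : Int :=
  if h : i < lines.length then
    if lines[i] = look then (i : Int) else aFind lines look (i + 1)
  else -1
termination_by lines.length - i
decreasing_by omega

-- second loop of A: for i in range(index+1, len(lines)): break on "", else append
def aCollect (lines : List String) (i : Nat) : List String :=
  if h : i < lines.length then
    let line := lines[i]
    if line = "" then [] else line :: aCollect lines (i + 1)
  else []
termination_by lines.length - i
decreasing_by omega

def getCorrespondingLines (lines : List String) (look : String) : List String :=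
  let index := aFind lines look 0
  if index = -1 then []  -- Python raises SyntaxError here; excluded by Pre_
  else aCollect lines (index.toNat + 1)

-- ===== PORT B =====
def getCorrespondingLines_alt (lines : List String) (look : String) : List String :=
  match PySem.List.index? lines look with
  | none => []  -- Python: lines.index raises ValueError, rewrapped as SyntaxError; excluded by Pre_
  | some i =>
    let rest := PySem.List.slice lines (some ((i : Int) + 1)) none   -- lines[lines.index(look)+1:]
    if "" ∈ rest then
      PySem.List.slice rest none (some (((PySem.List.index? rest "").getD 0 : Nat) : Int))  -- rest[:rest.index("")]
    else rest

-- ===== PRECONDITION & SPEC =====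
-- exactly the inputs on which Python A returns (otherwise it raises SyntaxError; B raises it too)
def Pre_getCorrespondingLines (lines : List String) (look : String) : Prop := look ∈ lines
instance (lines : List String) (look : String) : Decidable (Pre_getCorrespondingLines lines look) := by
  unfold Pre_getCorrespondingLines; infer_instance

def pvWitness_getCorrespondingLines : List String × String :=
  (["HEAD", "OUTPUT LABELS:", "0 one", "1 two", "", "tail"], "OUTPUT LABELS:")

def Spec_getCorrespondingLines (lines : List String) (look : String) (out : List String) : Prop := out = getCorrespondingLines_alt lines look
instance (lines : List String) (look : String) (out : List String) : Decidable (Spec_getCorrespondingLines lines look out) := by unfold Spec_getCorrespondingLines; infer_instance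

-- ===== CLAIM (what is proved, stated in full; the proofs are below) =====
def Claim_equal_getCorrespondingLines : Prop := ∀ (lines : List String) (look : String), Dom_getCorrespondingLines lines look → Pre_getCorrespondingLines lines look → Spec_getCorrespondingLines lines look (getCorrespondingLines lines look)

-- ===== LEMMAS AND PROOFS =====
-- A's collect loop computes takeWhile (· ≠ "") of the tail
lemma aCollect_eq_takeWhile (lines : List String) :
    ∀ n i, lines.length - i ≤ n → aCollect lines i = (lines.drop i).takeWhile (· ≠ "") := by
  intro n
  induction n with
  | zero =>
    intro i h
    have hle : lines.length ≤ i := by omega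
    rw [aCollect, List.drop_eq_nil_of_le hle]
    simp [Nat.not_lt.mpr hle]
  | succ n ih =>
    intro i h
    by_cases hi : i < lines.length
    · have hdrop : lines.drop i = lines[i] :: lines.drop (i + 1) := List.drop_eq_getElem_cons hi
      rw [aCollect, dif_pos hi, hdrop]
      by_cases hb : lines[i] = ""
      · simp [hb]
      · simp only [List.takeWhile_cons]
        rw [ih (i + 1) (by omega)]
        simp [hb]
    · rw [aCollect, dif_neg hi, List.drop_eq_nil_of_le (by omega)]
      simp

-- B's cut-at-first-blank also computes takeWhile (· ≠ "")
lemma cut_eq_takeWhile (l : List String) :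
    (if "" ∈ l then
        PySem.List.slice l none (some (((PySem.List.index? l "").getD 0 : Nat) : Int))
      else l) = l.takeWhile (· ≠ "") := by
  induction l with
  | nil => simp
  | cons a l ih =>
    by_cases ha : a = ""
    · subst ha
      rw [if_pos List.mem_cons_self, PySem.List.index?_cons_self]
      simp only [Option.getD_some, Nat.cast_zero]
      rw [PySem.List.slice_to _ (by norm_num)]
      simp
    · rw [List.takeWhile_cons]
      simp only [ha, ne_eq, not_false_eq_true, decide_true, if_pos]
      by_cases hm : "" ∈ l
      · rcases Option.isSome_iff_exists.mp (((PySem.List.index?_isSome_iff l "").mpr hm)) with ⟨k, hk⟩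
        rw [if_pos (List.mem_cons_of_mem _ hm), PySem.List.index?_cons_of_ne l ha, hk]
        simp only [Option.map_some, Option.getD_some, PySem.List.slice_to_natCast, List.take_succ_cons]
        rw [← ih, if_pos hm, hk]
        simp [PySem.List.slice_to_natCast]
      · have hnm : ¬ "" ∈ a :: l := by
          intro hc
          rcases List.mem_cons.mp hc with h | h
          · exact ha h.symm
          · exact hm h
        rw [if_neg hnm, ← ih, if_neg hm]


-- A's find loop computes index? of the tail (offset by i), -1 when absent
lemma aFind_eq_index? (lines : List String) (look : String) :
    ∀ n i, lines.length - i ≤ n →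
      aFind lines look i =
        (match PySem.List.index? (lines.drop i) look with
         | none => -1
         | some k => (i : Int) + k) := by
  intro n
  induction n with
  | zero =>
    intro i h
    have hle : lines.length ≤ i := by omega
    rw [aFind, List.drop_eq_nil_of_le hle]
    simp [Nat.not_lt.mpr hle, PySem.List.index?]
  | succ n ih =>
    intro i h
    by_cases hi : i < lines.length
    · have hdrop : lines.drop i = lines[i] :: lines.drop (i + 1) := List.drop_eq_getElem_cons hi
      rw [aFind, dif_pos hi, hdrop]
      by_cases hm : lines[i] = look
      · subst hm
        rw [if_pos rfl, PySem.List.index?_cons_self]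
        simp
      · rw [if_neg hm, PySem.List.index?_cons_of_ne (List.drop (i + 1) lines) hm,
          ih (i + 1) (by omega)]
        cases PySem.List.index? (lines.drop (i + 1)) look with
        | none => simp
        | some k => simp only [Option.map_some]; push_cast; ring
    · rw [aFind, dif_neg hi, List.drop_eq_nil_of_le (by omega)]
      simp [PySem.List.index?]

-- ===== VERDICT (by name: the statement is the Claim_ definition above) =====
theorem getCorrespondingLines_spec : Claim_equal_getCorrespondingLines := by
  intro lines look _ hpre
  unfold Spec_getCorrespondingLines getCorrespondingLines getCorrespondingLines_alt
  have hfind := aFind_eq_index? lines look lines.length 0 (by omega)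
  simp only [List.drop_zero, Nat.cast_zero, zero_add] at hfind
  rcases Option.isSome_iff_exists.mp ((PySem.List.index?_isSome_iff lines look).mpr hpre) with ⟨k, hk⟩
  rw [hk] at hfind
  simp only [hk, hfind]
  have hne : (k : Int) ≠ -1 := by omega
  rw [if_neg hne]
  have hslice : PySem.List.slice lines (some ((k : Int) + 1)) none = lines.drop (k + 1) := by
    have h1 : ((k : Int) + 1) = ((k + 1 : Nat) : Int) := by push_cast; ring
    rw [h1, PySem.List.slice_from_natCast]
  rw [hslice, Int.toNat_natCast,
    aCollect_eq_takeWhile lines lines.length (k + 1) (by omega), ← cut_eq_takeWhile]
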